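-- pv_equiv track=rewrite | github.com/cedana/cedana | test/k8s/throughput_final_viz.py | model_queue_depth
-- ===== SOURCE A (Python) =====
-- cedana_checkpoints = [78, 97, 129, 170, 179]  # seconds when checkpointed
--
-- def model_queue_depth(preemption_times, total_time, use_checkpoint, num_jobs=5):
--     """
--     Model queue depth based on the insight that:
--     - Baseline: Jobs restart from 0%, taking longer → queue backs up
--     - Cedana: Jobs resume from checkpoint → complete faster → queue clears
--     """
--     timeline = list(range(0, total_time + 1))
--     queue_depth = []
--
--     # Assume 2 nodes (3 jobs must queue initially)
--     num_nodes = 2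
--     initial_queue = num_jobs - num_nodes
--
--     # For baseline: Queue stays high because restarted jobs take longer
--     # For cedana: Queue clears faster because jobs complete quickly after restore
--
--     for t in timeline:
--         if use_checkpoint:
--             # Cedana: Queue decreases more steadily
--             # After each checkpoint/restore, jobs complete faster
--             completed = sum(1 for ct in cedana_checkpoints if t > ct + 20)
--             queue = max(0, initial_queue - completed)
--         else:
--             # Baseline: Queue stays high longer
--             # After preemption, jobs take full duration again
--             completed = sum(1 for pt in preemption_times if t > pt + 80)
--             queue = max(0, initial_queue - completed)
--
--         queue_depth.append(queue)
--
--     return timeline, queue_depth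
-- ===== SOURCE B (Python) =====
-- cedana_checkpoints = [78, 97, 129, 170, 179]  # seconds when checkpointed
--
-- def model_queue_depth(preemption_times, total_time, use_checkpoint, num_jobs=5):
--     # One incremental sweep: sort the completion deadlines once, then advance a
--     # pointer instead of rescanning all thresholds at every timestep.
--     num_nodes = 2
--     initial_queue = num_jobs - num_nodes
--     if use_checkpoint:
--         deadlines = sorted(ct + 20 for ct in cedana_checkpoints)
--     else:
--         deadlines = sorted(pt + 80 for pt in preemption_times)
--     k = len(deadlines)
--     timeline = []
--     queue_depth = []
--     completed = 0
--     for t in range(0, total_time + 1):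
--         timeline.append(t)
--         while completed < k and deadlines[completed] < t:
--             completed += 1
--         queue_depth.append(max(0, initial_queue - completed))
--     return timeline, queue_depth
-- ===== Notes on version B (the rewrite author's own statement) =====
-- stated objective: faster
-- what changed: B sorts the completion deadlines once and sweeps a single monotone pointer over the timeline instead of rescanning every threshold at each timestep.
import Mathlib
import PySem

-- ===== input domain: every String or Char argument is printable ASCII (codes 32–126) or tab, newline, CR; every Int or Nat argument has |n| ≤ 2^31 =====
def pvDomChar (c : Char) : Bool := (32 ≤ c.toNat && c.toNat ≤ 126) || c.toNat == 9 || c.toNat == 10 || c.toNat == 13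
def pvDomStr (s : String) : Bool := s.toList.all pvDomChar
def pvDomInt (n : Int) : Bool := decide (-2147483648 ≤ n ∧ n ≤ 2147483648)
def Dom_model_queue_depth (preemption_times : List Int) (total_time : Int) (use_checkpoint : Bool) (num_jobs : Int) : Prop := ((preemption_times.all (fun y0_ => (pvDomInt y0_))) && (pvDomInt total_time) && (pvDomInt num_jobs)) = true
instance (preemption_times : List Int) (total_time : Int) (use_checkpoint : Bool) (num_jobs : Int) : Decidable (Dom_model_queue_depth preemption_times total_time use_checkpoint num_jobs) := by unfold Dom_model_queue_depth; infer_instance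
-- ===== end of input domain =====

-- B sorts the deadlines once and sweeps one monotone pointer over the timeline
-- instead of rescanning all thresholds at every timestep (faster; return value only).

-- ===== PORT A =====
def cedana_checkpoints : List Int := [78, 97, 129, 170, 179]

def model_queue_depth (preemption_times : List Int) (total_time : Int) (use_checkpoint : Bool) (num_jobs : Int) : List Int × List Int :=
  let timeline := PySem.List.pyRange 0 (total_time + 1) 1
  let num_nodes : Int := 2
  let initial_queue := num_jobs - num_nodes
  let queue_depth := timeline.foldl (fun acc t =>
    let queue :=
      if use_checkpoint then
        let completed := cedana_checkpoints.foldl (fun c ct => c + (if t > ct + 20 then (1 : Int) else 0)) 0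
        max 0 (initial_queue - completed)
      else
        let completed := preemption_times.foldl (fun c pt => c + (if t > pt + 80 then (1 : Int) else 0)) 0
        max 0 (initial_queue - completed)
    acc ++ [queue]) []
  (timeline, queue_depth)

-- ===== PORT B =====
-- the inner 'while completed < k and deadlines[completed] < t' pointer advance,
-- with the untouched suffix of the sorted deadlines standing for the index
def bAdvance (t : Int) : List Int → Int → List Int × Int
  | [], c => ([], c)
  | d :: rs, c => if d < t then bAdvance t rs (c + 1) else (d :: rs, c)

-- one iteration of the for-loop body: state = (timeline, queue_depth, remaining deadlines, completed)
def bStep (iq : Int) (st : List Int × List Int × List Int × Int) (t : Int) : List Int × List Int × List Int × Int :=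
  let r := bAdvance t st.2.2.1 st.2.2.2
  (st.1 ++ [t], st.2.1 ++ [max 0 (iq - r.2)], r.1, r.2)

def model_queue_depth_alt (preemption_times : List Int) (total_time : Int) (use_checkpoint : Bool) (num_jobs : Int) : List Int × List Int :=
  let num_nodes : Int := 2
  let initial_queue := num_jobs - num_nodes
  let deadlines :=
    if use_checkpoint then PySem.List.sorted (cedana_checkpoints.map (fun ct => ct + 20)) (fun x => x) false
    else PySem.List.sorted (preemption_times.map (fun pt => pt + 80)) (fun x => x) false
  let r := (PySem.List.pyRange 0 (total_time + 1) 1).foldl (bStep initial_queue) ([], [], deadlines, 0)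
  (r.1, r.2.1)

-- ===== PRECONDITION & SPEC =====
def Spec_model_queue_depth (preemption_times : List Int) (total_time : Int) (use_checkpoint : Bool) (num_jobs : Int) (out : List Int × List Int) : Prop := out = model_queue_depth_alt preemption_times total_time use_checkpoint num_jobs
instance (preemption_times : List Int) (total_time : Int) (use_checkpoint : Bool) (num_jobs : Int) (out : List Int × List Int) : Decidable (Spec_model_queue_depth preemption_times total_time use_checkpoint num_jobs out) := by unfold Spec_model_queue_depth; infer_instance

-- ===== CLAIM (what is proved, stated in full; the proofs are below) =====
def Claim_equal_model_queue_depth : Prop := ∀ (preemption_times : List Int) (total_time : Int) (use_checkpoint : Bool) (num_jobs : Int), Dom_model_queue_depth preemption_times total_time use_checkpoint num_jobs → Spec_model_queue_depth preemption_times total_time use_checkpoint num_jobs (model_queue_depth preemption_times total_time use_checkpoint num_jobs)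

-- ===== LEMMAS AND PROOFS =====

-- bAdvance drops exactly the prefix of deadlines below t and counts it
lemma bAdvance_eq (t : Int) : ∀ (rem : List Int) (c : Int),
    bAdvance t rem c = (rem.dropWhile (fun d => decide (d < t)),
      c + ((rem.takeWhile (fun d => decide (d < t))).length : Int)) := by
  intro rem
  induction rem with
  | nil => intro c; simp [bAdvance]
  | cons d rs ih =>
    intro c
    by_cases h : d < t
    · simp [bAdvance, h, List.dropWhile, List.takeWhile, ih]
      push_cast; ring
    · simp [bAdvance, h, List.dropWhile, List.takeWhile]

lemma dropWhile_dropWhile (t t' : Int) (h : t ≤ t') : ∀ (x : List Int),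
    (x.dropWhile (fun d => decide (d < t))).dropWhile (fun d => decide (d < t'))
      = x.dropWhile (fun d => decide (d < t')) := by
  intro x
  induction x with
  | nil => simp
  | cons d rs ih =>
    by_cases hd : d < t
    · have hd' : d < t' := lt_of_lt_of_le hd h
      simp [List.dropWhile, hd, hd', ih]
    · simp [List.dropWhile, hd]

lemma takeWhile_length_add (t t' : Int) (h : t ≤ t') : ∀ (x : List Int),
    (x.takeWhile (fun d => decide (d < t'))).length
      = (x.takeWhile (fun d => decide (d < t))).length
        + ((x.dropWhile (fun d => decide (d < t))).takeWhile (fun d => decide (d < t'))).length := by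
  intro x
  induction x with
  | nil => simp
  | cons d rs ih =>
    by_cases hd : d < t
    · have hd' : d < t' := lt_of_lt_of_le hd h
      simp [List.takeWhile, List.dropWhile, hd, hd', ih]
      omega
    · simp [List.takeWhile, List.dropWhile, hd]

-- the sweep loop, relative to the full sorted deadline list s
lemma loopB (iq : Int) (s : List Int) :
    ∀ (ts : List Int), ts.Pairwise (· ≤ ·) →
    ∀ (rem : List Int) (c : Int) (tl qd : List Int),
    (∀ t ∈ ts,
        rem.dropWhile (fun d => decide (d < t)) = s.dropWhile (fun d => decide (d < t)) ∧
        c + ((rem.takeWhile (fun d => decide (d < t))).length : Int)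
          = ((s.takeWhile (fun d => decide (d < t))).length : Int)) →
    (ts.foldl (bStep iq) (tl, qd, rem, c)).1 = tl ++ ts ∧
    (ts.foldl (bStep iq) (tl, qd, rem, c)).2.1
      = qd ++ ts.map (fun t => max 0 (iq - ((s.takeWhile (fun d => decide (d < t))).length : Int))) := by
  intro ts
  induction ts with
  | nil => intro _ rem c tl qd _; simp
  | cons t ts' ih =>
    intro hpair rem c tl qd hinv
    have hhead := hinv t (by simp)
    have hstep : bStep iq (tl, qd, rem, c) t
        = (tl ++ [t], qd ++ [max 0 (iq - ((s.takeWhile (fun d => decide (d < t))).length : Int))],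
           rem.dropWhile (fun d => decide (d < t)),
           c + ((rem.takeWhile (fun d => decide (d < t))).length : Int)) := by
      simp [bStep, bAdvance_eq, hhead.2]
    have hle : ∀ t' ∈ ts', t ≤ t' := by
      intro t' ht'; exact (List.pairwise_cons.mp hpair).1 t' ht'
    have hinv' : ∀ t' ∈ ts',
        (rem.dropWhile (fun d => decide (d < t))).dropWhile (fun d => decide (d < t'))
          = s.dropWhile (fun d => decide (d < t')) ∧
        (c + ((rem.takeWhile (fun d => decide (d < t))).length : Int))
            + (((rem.dropWhile (fun d => decide (d < t))).takeWhile (fun d => decide (d < t'))).length : Int)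
          = ((s.takeWhile (fun d => decide (d < t'))).length : Int) := by
      intro t' ht'
      have h1 := hinv t' (by simp [ht'])
      constructor
      · rw [dropWhile_dropWhile t t' (hle t' ht') rem]; exact h1.1
      · have h2 := takeWhile_length_add t t' (hle t' ht') rem
        have h3 := h1.2
        push_cast [h2] at h3 ⊢
        omega
    have := ih (List.pairwise_cons.mp hpair).2
      (rem.dropWhile (fun d => decide (d < t)))
      (c + ((rem.takeWhile (fun d => decide (d < t))).length : Int))
      (tl ++ [t])
      (qd ++ [max 0 (iq - ((s.takeWhile (fun d => decide (d < t))).length : Int))])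
      hinv'
    simp only [List.foldl_cons, hstep]
    refine ⟨?_, ?_⟩
    · rw [this.1]; simp
    · rw [this.2]; simp
    
-- A's inner sum is a countP
lemma foldl_count (t off : Int) : ∀ (l : List Int) (c : Int),
    l.foldl (fun acc d => acc + (if t > d + off then (1 : Int) else 0)) c
      = c + ((l.countP (fun d => decide (d + off < t))) : Int) := by
  intro l
  induction l with
  | nil => intro c; simp
  | cons d rs ih =>
    intro c
    by_cases h : d + off < t
    · simp only [List.foldl_cons, List.countP_cons]
      rw [ih]
      simp [h]
      ring
    · simp only [List.foldl_cons, List.countP_cons]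
      rw [ih]
      simp [h, gt_iff_lt]

-- on a ≤-sorted list, elements below t form a prefix
lemma takeWhile_length_eq_countP (t : Int) : ∀ (s : List Int), s.Pairwise (· ≤ ·) →
    (s.takeWhile (fun d => decide (d < t))).length = s.countP (fun d => decide (d < t)) := by
  intro s
  induction s with
  | nil => simp
  | cons d rs ih =>
    intro hp
    by_cases h : d < t
    · simp [List.takeWhile, h, ih (List.pairwise_cons.mp hp).2]
    · simp only [List.takeWhile, h, decide_false]
      have : rs.countP (fun d => decide (d < t)) = 0 := by
        apply List.countP_eq_zero.mpr
        intro x hx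
        have := (List.pairwise_cons.mp hp).1 x hx
        simp; omega
      simp [h, this]

-- A's per-timestep count equals the prefix length in the sorted deadline list
lemma count_eq_takeWhile (t off : Int) (l : List Int) :
    (l.countP (fun d => decide (d + off < t)) : Int)
      = (((PySem.List.sorted (l.map (fun d => d + off)) (fun x => x) false).takeWhile
            (fun d => decide (d < t))).length : Int) := by
  have hperm : (PySem.List.sorted (l.map (fun d => d + off)) (fun x => x) false).Perm (l.map (fun d => d + off)) :=
    PySem.List.sorted_perm _ _ _
  rw [takeWhile_length_eq_countP t _ (PySem.List.sorted_pairwise (l.map (fun d => d + off)) (fun x => x))]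
  rw [hperm.countP_eq]
  rw [List.countP_map]
  rfl

-- foldl-append builds a map
lemma foldl_append_map (h : Int → Int) : ∀ (ts init : List Int),
    ts.foldl (fun acc t => acc ++ [h t]) init = init ++ ts.map h := by
  intro ts
  induction ts with
  | nil => intro init; simp
  | cons t ts' ih => intro init; simp [ih]

lemma pairwise_le_pyRange (a b : Int) : (PySem.List.pyRange a b 1).Pairwise (· ≤ ·) :=
  (PySem.List.pairwise_lt_pyRange_one a b).imp le_of_lt

-- ===== VERDICT (by name: the statement is the Claim_ definition above) =====
theorem model_queue_depth_spec : Claim_equal_model_queue_depth := by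
  intro preemption_times total_time use_checkpoint num_jobs _
  unfold Spec_model_queue_depth model_queue_depth model_queue_depth_alt
  cases use_checkpoint with
  | false =>
    have hloop := loopB (num_jobs - 2)
      (PySem.List.sorted (preemption_times.map (fun pt => pt + 80)) (fun x => x) false)
      (PySem.List.pyRange 0 (total_time + 1) 1) (pairwise_le_pyRange 0 (total_time + 1))
      (PySem.List.sorted (preemption_times.map (fun pt => pt + 80)) (fun x => x) false) 0 [] []
      (by intro t _; exact ⟨rfl, by simp⟩)
    simp only [Bool.false_eq_true, if_false]
    rw [foldl_append_map (fun t => max 0 ((num_jobs - 2) - (preemption_times.foldl (fun c pt => c + (if t > pt + 80 then (1 : Int) else 0)) 0)))]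
    refine Prod.ext ?_ ?_
    · rw [hloop.1]; simp
    · rw [hloop.2, List.nil_append, List.nil_append]
      apply List.map_congr_left
      intro t _
      rw [foldl_count t 80 preemption_times 0, count_eq_takeWhile t 80 preemption_times]
      simp
  | true =>
    have hloop := loopB (num_jobs - 2)
      (PySem.List.sorted (cedana_checkpoints.map (fun ct => ct + 20)) (fun x => x) false)
      (PySem.List.pyRange 0 (total_time + 1) 1) (pairwise_le_pyRange 0 (total_time + 1))
      (PySem.List.sorted (cedana_checkpoints.map (fun ct => ct + 20)) (fun x => x) false) 0 [] []
      (by intro t _; exact ⟨rfl, by simp⟩)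
    simp only [if_true]
    rw [foldl_append_map (fun t => max 0 ((num_jobs - 2) - (cedana_checkpoints.foldl (fun c ct => c + (if t > ct + 20 then (1 : Int) else 0)) 0)))]
    refine Prod.ext ?_ ?_
    · rw [hloop.1]; simp
    · rw [hloop.2, List.nil_append, List.nil_append]
      apply List.map_congr_left
      intro t _
      rw [foldl_count t 20 cedana_checkpoints 0, count_eq_takeWhile t 20 cedana_checkpoints]
      simp
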